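-- pv_equiv track=rewrite | github.com/rnrnrnrn1235/Priority-Scheduling-Non-preemtive- | mainProgram.py | calcCompletionTime
-- ===== SOURCE A (Python) =====
-- def calcCompletionTime(processes, numOfProcess):
--     #s: move condition in loop, make sure only the first operation starts when it arrives
--     completionTime = []
--     for i in range(numOfProcess):
--         if i == 0:
--             start = processes[i]["arrival time"]
--         #other operations are calculated based on the completion of the previous one or arrival time
--         else:
--             if completionTime[i-1] < processes[i]['arrival time']:
--                 start = processes[i]["arrival time"]
--             else:
--                 start = completionTime[i-1]
--                 #start = processes[i - 1]["arrival time"]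
--                 #the process starts either when it arrives or when the other finishes
--                 #so we use previous process completion time otherwise error fe el nateg
--         completionTime.append(start + processes[i]["burst time"])
--     return completionTime
-- ===== SOURCE B (Python) =====
-- def calcCompletionTime(processes, numOfProcess):
--     # Structural recursion threading only the previous completion time:
--     # no index arithmetic, no completionTime[i-1] lookups, no i==0 branch
--     # (the seed max(a0, arrival[0]) collapses to arrival[0]).
--     def go(rest, k, acc):
--         if k <= 0 or not rest:
--             return []
--         p = rest[0]
--         c = max(acc, p["arrival time"]) + p["burst time"]
--         return [c] + go(rest[1:], k - 1, c)
--     if numOfProcess <= 0 or not processes: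
--         return []
--     return go(processes, numOfProcess, processes[0]["arrival time"])
-- ===== Notes on version B (the rewrite author's own statement) =====
-- stated objective: simpler
-- what changed: Replaces the index-driven loop that re-reads completionTime[i-1] and special-cases i==0 with a structural recursion that threads only the previous completion time as an accumulator.
import Mathlib
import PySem

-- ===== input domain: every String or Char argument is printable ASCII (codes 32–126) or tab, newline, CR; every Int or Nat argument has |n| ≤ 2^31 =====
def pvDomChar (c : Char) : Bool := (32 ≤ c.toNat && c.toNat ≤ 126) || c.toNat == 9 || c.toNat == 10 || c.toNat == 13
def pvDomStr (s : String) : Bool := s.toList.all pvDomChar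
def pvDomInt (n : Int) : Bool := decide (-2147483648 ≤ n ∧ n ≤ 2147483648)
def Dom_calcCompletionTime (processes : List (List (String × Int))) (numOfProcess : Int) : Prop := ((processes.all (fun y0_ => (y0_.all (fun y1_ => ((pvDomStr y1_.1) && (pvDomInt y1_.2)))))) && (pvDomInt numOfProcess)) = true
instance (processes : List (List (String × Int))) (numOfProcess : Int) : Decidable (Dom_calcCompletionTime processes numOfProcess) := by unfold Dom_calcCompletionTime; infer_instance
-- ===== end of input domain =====

-- B replaces the index loop (with its completionTime[i-1] lookups and i==0 branch) by a
-- structural recursion threading the previous completion time; the return values agree on Pre_.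

-- d[k] for the Python dict (association list, first match); value 0 stands in for the
-- KeyError case, which Pre_ excludes.
def pvLookup (d : List (String × Int)) (k : String) : Int :=
  ((d.lookup k).getD 0)

-- ===== PORT A =====
def calcCompletionTime (processes : List (List (String × Int))) (numOfProcess : Int) : List Int :=
  (PySem.List.pyRange 0 numOfProcess 1).foldl
    (fun completionTime i =>
      let p := (PySem.List.pyGet? processes i).getD []
      let start :=
        if i == 0 then pvLookup p "arrival time"
        else
          let prev := (PySem.List.pyGet? completionTime (i - 1)).getD 0
          if prev < pvLookup p "arrival time" then pvLookup p "arrival time"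
          else prev
      completionTime ++ [start + pvLookup p "burst time"]) []

-- ===== PORT B =====
def pvGo (rest : List (List (String × Int))) (k : Int) (acc : Int) : List Int :=
  match rest with
  | [] => []
  | p :: tail =>
    if k ≤ 0 then []
    else
      let c := max acc (pvLookup p "arrival time") + pvLookup p "burst time"
      c :: pvGo tail (k - 1) c

def calcCompletionTime_alt (processes : List (List (String × Int))) (numOfProcess : Int) : List Int :=
  if numOfProcess ≤ 0 then []
  else
    match processes with
    | [] => []
    | p :: _ => pvGo processes numOfProcess (pvLookup p "arrival time")

-- ===== PRECONDITION & SPEC =====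
-- Pre_ excludes exactly the inputs where the Python A raises: numOfProcess > len(processes)
-- (IndexError) or a scheduled process missing the "arrival time"/"burst time" key (KeyError).
def Pre_calcCompletionTime (processes : List (List (String × Int))) (numOfProcess : Int) : Prop :=
  numOfProcess ≤ (processes.length : Int) ∧
  ∀ p ∈ processes.take numOfProcess.toNat,
    (p.lookup "arrival time").isSome ∧ (p.lookup "burst time").isSome

instance (processes : List (List (String × Int))) (numOfProcess : Int) : Decidable (Pre_calcCompletionTime processes numOfProcess) := by unfold Pre_calcCompletionTime; infer_instance

def pvWitness_calcCompletionTime : (List (List (String × Int))) × Int :=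
  ([[("arrival time", 2), ("burst time", 3)], [("arrival time", 1), ("burst time", 4)]], 2)

def Spec_calcCompletionTime (processes : List (List (String × Int))) (numOfProcess : Int) (out : List Int) : Prop := out = calcCompletionTime_alt processes numOfProcess
instance (processes : List (List (String × Int))) (numOfProcess : Int) (out : List Int) : Decidable (Spec_calcCompletionTime processes numOfProcess out) := by unfold Spec_calcCompletionTime; infer_instance

-- ===== CLAIM (what is proved, stated in full; the proofs are below) =====
def Claim_equal_calcCompletionTime : Prop := ∀ (processes : List (List (String × Int))) (numOfProcess : Int), Dom_calcCompletionTime processes numOfProcess → Pre_calcCompletionTime processes numOfProcess → Spec_calcCompletionTime processes numOfProcess (calcCompletionTime processes numOfProcess)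

-- ===== LEMMAS AND PROOFS =====

-- one scheduling step
def pvStep (acc : Int) (p : List (String × Int)) : Int :=
  max acc (pvLookup p "arrival time") + pvLookup p "burst time"

-- reference: completion times of a prefix, threading the accumulator
def pvComps (l : List (List (String × Int))) (acc : Int) : List Int :=
  match l with
  | [] => []
  | p :: tail => pvStep acc p :: pvComps tail (pvStep acc p)

def pvFin (l : List (List (String × Int))) (acc : Int) : Int := l.foldl pvStep acc

-- the body of A's loop, named for the proofs
def pvBody (processes : List (List (String × Int))) (completionTime : List Int) (i : Int) : List Int :=
  let p := (PySem.List.pyGet? processes i).getD []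
  let start :=
    if i == 0 then pvLookup p "arrival time"
    else
      let prev := (PySem.List.pyGet? completionTime (i - 1)).getD 0
      if prev < pvLookup p "arrival time" then pvLookup p "arrival time"
      else prev
  completionTime ++ [start + pvLookup p "burst time"]

theorem calc_eq_fold (processes : List (List (String × Int))) (n : Int) :
    calcCompletionTime processes n = (PySem.List.pyRange 0 n 1).foldl (pvBody processes) [] := rfl

theorem pvGo_eq_comps (rest : List (List (String × Int))) (k acc : Int) :
    pvGo rest k acc = pvComps (rest.take k.toNat) acc := by
  induction rest generalizing k acc with
  | nil => simp [pvGo, pvComps]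
  | cons p tail ih =>
    by_cases hk : k ≤ 0
    · have h0 : k.toNat = 0 := by omega
      simp [pvGo, hk, h0, pvComps]
    · have hk' : k.toNat = (k - 1).toNat + 1 := by omega
      simp only [pvGo, if_neg hk, hk', List.take_succ_cons, pvComps, pvStep]
      rw [ih]

theorem pvComps_length (l : List (List (String × Int))) (acc : Int) :
    (pvComps l acc).length = l.length := by
  induction l generalizing acc with
  | nil => rfl
  | cons p tail ih => simp [pvComps, ih]

theorem pvComps_append_singleton (l : List (List (String × Int))) (p : List (String × Int)) (acc : Int) :
    pvComps (l ++ [p]) acc = pvComps l acc ++ [pvStep (pvFin l acc) p] := by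
  induction l generalizing acc with
  | nil => simp [pvComps, pvFin]
  | cons q tail ih => simp [pvComps, ih, pvFin, List.foldl_cons]

theorem pvComps_getLast (l : List (List (String × Int))) (acc : Int) (h : l ≠ []) :
    (pvComps l acc).getLast? = some (pvFin l acc) := by
  obtain ⟨l', p, hl⟩ := (List.eq_nil_or_concat l).resolve_left h
  subst hl
  rw [List.concat_eq_append, pvComps_append_singleton]
  simp [pvFin]

-- A's fold over range(n) computes pvComps of the n-prefix, seeded with the first arrival.
theorem calc_fold_eq_comps (p0 : List (String × Int))
    (rest : List (List (String × Int))) (n : Nat)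
    (hn : n ≤ (p0 :: rest).length) :
    calcCompletionTime (p0 :: rest) (n : Int) =
      pvComps ((p0 :: rest).take n) (pvLookup p0 "arrival time") := by
  induction n with
  | zero => simp [calc_eq_fold, PySem.List.pyRange_one_eq_nil, pvComps]
  | succ m ih =>
    have hm : m ≤ (p0 :: rest).length := by omega
    have hlt : m < (p0 :: rest).length := by omega
    have hstep : calcCompletionTime (p0 :: rest) ((m + 1 : Nat) : Int) =
        pvBody (p0 :: rest) (calcCompletionTime (p0 :: rest) (m : Int)) (m : Int) := by
      rw [calc_eq_fold, calc_eq_fold,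
          show ((m + 1 : Nat) : Int) = (m : Int) + 1 by push_cast; ring,
          PySem.List.pyRange_one_succ_right (by positivity), List.foldl_append]
      rfl
    have hget : (PySem.List.pyGet? (p0 :: rest) (m : Int)).getD [] = (p0 :: rest)[m] := by
      rw [PySem.List.pyGet?_natCast]
      simp [List.getElem?_eq_getElem hlt]
    have htake : (p0 :: rest).take (m + 1) = (p0 :: rest).take m ++ [(p0 :: rest)[m]] := by
      rw [List.take_add_one, List.getElem?_eq_getElem hlt]
      rfl
    rw [hstep, ih hm, pvBody, hget]
    rcases Nat.eq_zero_or_pos m with hm0 | hmpos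
    · subst hm0
      simp [htake, pvComps, pvStep]
    · have hne : ((m : Int) == 0) = false := by
        simp; omega
      have hlen : (pvComps ((p0 :: rest).take m) (pvLookup p0 "arrival time")).length = m := by
        simp only [pvComps_length, List.length_take]; omega
      have hnil : (p0 :: rest).take m ≠ [] := by
        intro h
        have := congrArg List.length h
        simp [List.length_take] at this
        omega
      have hprev : (PySem.List.pyGet? (pvComps ((p0 :: rest).take m) (pvLookup p0 "arrival time"))
            ((m : Int) - 1)).getD 0 = pvFin ((p0 :: rest).take m) (pvLookup p0 "arrival time") := by
        have hcast : ((m : Int) - 1) = ((m - 1 : Nat) : Int) := by omega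
        rw [hcast, PySem.List.pyGet?_natCast,
            show (m - 1 : Nat) = (pvComps ((p0 :: rest).take m) (pvLookup p0 "arrival time")).length - 1 by omega,
            ← List.getLast?_eq_getElem?, pvComps_getLast _ _ hnil]
        rfl
      simp only [hne, Bool.false_eq_true, if_false, hprev]
      rw [htake, pvComps_append_singleton]
      congr 1
      have : (if pvFin ((p0 :: rest).take m) (pvLookup p0 "arrival time") < pvLookup (p0 :: rest)[m] "arrival time"
              then pvLookup (p0 :: rest)[m] "arrival time"
              else pvFin ((p0 :: rest).take m) (pvLookup p0 "arrival time")) =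
          max (pvFin ((p0 :: rest).take m) (pvLookup p0 "arrival time")) (pvLookup (p0 :: rest)[m] "arrival time") := by
        rcases lt_or_ge (pvFin ((p0 :: rest).take m) (pvLookup p0 "arrival time")) (pvLookup (p0 :: rest)[m] "arrival time") with h | h
        · rw [if_pos h, max_eq_right h.le]
        · rw [if_neg (not_lt.mpr h), max_eq_left h]
      rw [this]
      rfl

-- ===== VERDICT (by name: the statement is the Claim_ definition above) =====
theorem calcCompletionTime_spec : Claim_equal_calcCompletionTime := by
  intro processes n _ hpre
  unfold Spec_calcCompletionTime
  by_cases hn0 : n ≤ 0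
  · have h1 : calcCompletionTime_alt processes n = [] := by
      unfold calcCompletionTime_alt; rw [if_pos hn0]
    have h2 : calcCompletionTime processes n = [] := by
      rw [calc_eq_fold, PySem.List.pyRange_one_eq_nil hn0]; rfl
    rw [h1, h2]
  · obtain ⟨hlen, -⟩ := hpre
    have hplen : 0 < processes.length := by omega
    obtain ⟨p0, rest, rfl⟩ := List.exists_cons_of_ne_nil (List.ne_nil_of_length_pos hplen)
    have hcast : n = ((n.toNat : Nat) : Int) := by omega
    have htn : n.toNat ≤ (p0 :: rest).length := by omega
    rw [hcast, calc_fold_eq_comps p0 rest n.toNat htn]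
    unfold calcCompletionTime_alt
    rw [if_neg (by omega)]
    show pvComps (List.take n.toNat (p0 :: rest)) (pvLookup p0 "arrival time") =
      pvGo (p0 :: rest) (n.toNat : Int) (pvLookup p0 "arrival time")
    rw [pvGo_eq_comps, Int.toNat_natCast]
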